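-- pv_equiv track=rewrite | github.com/darwinz/hackerrank | algorithms/python/odd-numbers.py | oddNumbers
-- ===== SOURCE A (Python) =====
-- def  oddNumbers(l, r):
--     oddList = []
--     for x in range(l,r+1):
--         if x % 2 == 0:
--             continue
--         else:
--             oddList.append(x)
--     return oddList
-- ===== SOURCE B (Python) =====
-- def oddNumbers(l, r):
--     start = l if l % 2 != 0 else l + 1
--     return list(range(start, r + 1, 2))
-- ===== Notes on version B (the rewrite author's own statement) =====
-- stated objective: simpler
-- what changed: Instead of scanning every integer in [l,r] and filtering with a per-element parity branch, B computes the first odd value once and emits the odd numbers directly with a step-2 range, visiting only the odd elements.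
import Mathlib
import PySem

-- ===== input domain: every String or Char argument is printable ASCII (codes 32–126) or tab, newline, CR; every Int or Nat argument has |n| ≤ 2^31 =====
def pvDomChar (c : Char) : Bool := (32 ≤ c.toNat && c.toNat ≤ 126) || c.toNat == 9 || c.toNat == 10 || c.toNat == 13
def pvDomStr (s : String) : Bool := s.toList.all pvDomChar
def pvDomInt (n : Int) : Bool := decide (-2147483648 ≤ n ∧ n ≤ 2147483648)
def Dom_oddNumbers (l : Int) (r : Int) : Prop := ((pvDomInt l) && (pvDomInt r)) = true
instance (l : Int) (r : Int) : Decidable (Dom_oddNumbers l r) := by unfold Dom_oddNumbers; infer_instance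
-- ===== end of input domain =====

-- B computes the first odd value once and emits odds directly with a step-2 range (no per-element parity test); proved equal to A everywhere.


-- ===== PORT A =====
-- for x in range(l, r+1): if x % 2 == 0: continue else: oddList.append(x)
def oddNumbers (l : Int) (r : Int) : List Int :=
  (PySem.List.pyRange l (r + 1) 1).foldl
    (fun oddList x => if PySem.Int.mod x 2 == 0 then oddList else oddList ++ [x]) []

-- ===== PORT B =====
-- start = l if l % 2 != 0 else l + 1; return list(range(start, r+1, 2))
def oddNumbers_alt (l : Int) (r : Int) : List Int :=
  let start := if PySem.Int.mod l 2 ≠ 0 then l else l + 1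
  PySem.List.pyRange start (r + 1) 2

-- ===== PRECONDITION & SPEC =====
def Spec_oddNumbers (l : Int) (r : Int) (out : List Int) : Prop := out = oddNumbers_alt l r
instance (l : Int) (r : Int) (out : List Int) : Decidable (Spec_oddNumbers l r out) := by unfold Spec_oddNumbers; infer_instance

-- ===== CLAIM (what is proved, stated in full; the proofs are below) =====
def Claim_equal_oddNumbers : Prop := ∀ (l : Int) (r : Int), Dom_oddNumbers l r → Spec_oddNumbers l r (oddNumbers l r)

-- ===== LEMMAS AND PROOFS =====

-- A's loop is a filter of the range
theorem oddA_foldl_filter (xs : List Int) (acc : List Int) :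
    xs.foldl (fun oddList x => if PySem.Int.mod x 2 == 0 then oddList else oddList ++ [x]) acc
      = acc ++ xs.filter (fun x => !(PySem.Int.mod x 2 == 0)) := by
  induction xs generalizing acc with
  | nil => simp
  | cons x xs ih =>
    rw [List.foldl_cons, ih, List.filter_cons]
    by_cases h : (PySem.Int.mod x 2 == 0) = true
    · rw [if_pos h, if_neg (by rw [h]; decide)]
    · rw [Bool.not_eq_true] at h
      rw [if_neg (by rw [h]; decide), if_pos (by rw [h]; decide), List.append_assoc]
      rfl

theorem pyRange_two_nil (a b : Int) (h : b ≤ a) : PySem.List.pyRange a b 2 = [] := by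
  rw [PySem.List.pyRange_of_pos a b (by norm_num)]
  rw [if_neg (by omega)]
  simp

theorem pyRange_two_cons (a b : Int) (h : a < b) :
    PySem.List.pyRange a b 2 = a :: PySem.List.pyRange (a + 2) b 2 := by
  rw [PySem.List.pyRange_of_pos a b (by norm_num),
      PySem.List.pyRange_of_pos (a + 2) b (by norm_num)]
  by_cases h2 : a + 2 < b
  · rw [if_pos h, if_pos h2]
    have hn : ((b - a + 2 - 1) / 2).toNat = ((b - (a + 2) + 2 - 1) / 2).toNat + 1 := by omega
    rw [hn, List.range_succ_eq_map, List.map_cons, List.map_map]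
    refine congrArg₂ _ (by ring) ?_
    apply List.map_congr_left
    intro k _
    simp [Function.comp]
    ring
  · rw [if_pos h, if_neg h2]
    have hn : ((b - a + 2 - 1) / 2).toNat = 1 := by omega
    rw [hn]
    simp

-- main induction on the length of the scanned range
theorem odd_key : ∀ (n : Nat) (l r : Int), (r + 1 - l).toNat = n →
    (PySem.List.pyRange l (r + 1) 1).filter (fun x => !(PySem.Int.mod x 2 == 0))
      = PySem.List.pyRange (if PySem.Int.mod l 2 ≠ 0 then l else l + 1) (r + 1) 2 := by
  intro n
  induction n with
  | zero =>
    intro l r h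
    have hle : r + 1 ≤ l := by omega
    rw [PySem.List.pyRange_one_eq_nil hle, List.filter_nil]
    split
    · exact (pyRange_two_nil _ _ hle).symm
    · exact (pyRange_two_nil _ _ (by omega)).symm
  | succ n ih =>
    intro l r h
    have hlt : l < r + 1 := by omega
    rw [PySem.List.pyRange_one_cons hlt, List.filter_cons]
    have ih' := ih (l + 1) r (by omega)
    have hmodl : PySem.Int.mod l 2 = l % 2 := PySem.Int.mod_eq_emod_of_pos (by norm_num)
    have hmodl1 : PySem.Int.mod (l + 1) 2 = (l + 1) % 2 := PySem.Int.mod_eq_emod_of_pos (by norm_num)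
    by_cases hev : l % 2 = 0
    · -- l even: x is skipped, and B starts at l+1 in both recursions
      rw [if_neg (by simp [hev])]
      rw [ih']
      rw [if_pos (by rw [hmodl1]; omega), if_neg (by rw [hmodl]; omega)]
    · -- l odd: x is kept, B starts at l and steps to l+2
      rw [if_pos (by simp [hev])]
      rw [ih']
      rw [if_neg (by rw [hmodl1]; omega), if_pos (by rw [hmodl]; omega)]
      rw [show l + 1 + 1 = l + 2 from by ring]
      exact (pyRange_two_cons l (r + 1) hlt).symm

-- ===== VERDICT (by name: the statement is the Claim_ definition above) =====
theorem oddNumbers_spec : Claim_equal_oddNumbers := by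
  intro l r _
  unfold Spec_oddNumbers oddNumbers oddNumbers_alt
  rw [oddA_foldl_filter, List.nil_append]
  exact odd_key (r + 1 - l).toNat l r rfl
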